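-- pv_equiv track=rewrite | github.com/xeon123/medusa-1.0 | medusa/simplepartioner.py | xdistribute
-- ===== SOURCE A (Python) =====
-- def xdistribute(clusters, files):
--     """ get a matrix [cluster:(path1, path2, ..., path n)], which distributes files to the clusters """
--
--     if not clusters:
--         return None
--
--     csize = len(clusters)
--
--     matrix = dict(zip(clusters, [list() for _ in range(len(clusters))]))
--     for i, path in enumerate(files):
--         matrix[clusters[i % csize]].append(path)
--
--     return matrix
-- ===== SOURCE B (Python) =====
-- def xdistribute(clusters, files):
--     """ get a matrix [cluster:(path1, path2, ..., path n)], which distributes files to the clusters """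
--     if not clusters:
--         return None
--     csize = len(clusters)
--     return {c: [f for i, f in enumerate(files) if clusters[i % csize] == c]
--             for c in clusters}
-- ===== Notes on version B (the rewrite author's own statement) =====
-- stated objective: simpler
-- what changed: A pre-builds a dict of empty lists and appends each file to its round-robin cluster in a per-file loop; B is a single dict comprehension over clusters where each cluster filters out the files whose round-robin slot index names it.
import Mathlib
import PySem

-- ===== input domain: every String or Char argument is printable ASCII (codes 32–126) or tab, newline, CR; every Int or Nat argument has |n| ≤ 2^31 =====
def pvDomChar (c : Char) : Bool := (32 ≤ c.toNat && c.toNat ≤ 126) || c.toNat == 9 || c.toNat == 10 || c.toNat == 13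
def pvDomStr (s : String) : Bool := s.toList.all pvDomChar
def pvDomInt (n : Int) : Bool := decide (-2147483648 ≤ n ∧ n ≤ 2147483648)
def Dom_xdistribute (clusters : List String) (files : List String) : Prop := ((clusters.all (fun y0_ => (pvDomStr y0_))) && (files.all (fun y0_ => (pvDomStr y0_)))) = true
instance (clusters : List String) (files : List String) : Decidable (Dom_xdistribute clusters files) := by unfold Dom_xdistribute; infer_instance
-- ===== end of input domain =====

-- B replaces A's per-file round-robin append loop by a dict comprehension over clusters,
-- each cluster filtering the files whose round-robin slot names it: a simpler decomposition, same result.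

-- ===== PORT A =====
-- matrix[clusters[i % csize]] in A always hits an existing key (i % csize is a valid index and
-- every cluster is a key of matrix), so Dict.modify with default [] and pyGetD with default ""
-- are exact here.
def xdistribute (clusters : List String) (files : List String) : Option (List (String × List String)) :=
  if clusters = [] then none
  else
    let csize : Int := (clusters.length : Int)
    let matrix : PySem.Dict String (List String) :=
      (clusters.zip ((PySem.List.pyRange 0 (clusters.length : Int) 1).map
          (fun _ => ([] : List String)))).foldl
        (fun d kv => d.insert kv.1 kv.2) PySem.Dict.empty
    let matrix :=
      (PySem.List.enumerate files).foldl
        (fun d p =>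
          d.modify (PySem.List.pyGetD clusters (PySem.Int.mod p.1 csize) "") []
            (fun l => l ++ [p.2]))
        matrix
    some matrix.items

-- ===== PORT B =====
def xdistribute_alt (clusters : List String) (files : List String) : Option (List (String × List String)) :=
  if clusters = [] then none
  else
    let csize : Int := (clusters.length : Int)
    let matrix : PySem.Dict String (List String) :=
      clusters.foldl
        (fun d c =>
          d.insert c
            (((PySem.List.enumerate files).filter
                (fun p => PySem.List.pyGetD clusters (PySem.Int.mod p.1 csize) "" == c)).map
              (·.2)))
        PySem.Dict.empty
    some matrix.items

-- ===== PRECONDITION & SPEC =====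
def Spec_xdistribute (clusters : List String) (files : List String) (out : Option (List (String × List String))) : Prop := out = xdistribute_alt clusters files
instance (clusters : List String) (files : List String) (out : Option (List (String × List String))) : Decidable (Spec_xdistribute clusters files out) := by unfold Spec_xdistribute; infer_instance

-- ===== CLAIM (what is proved, stated in full; the proofs are below) =====
def Claim_equal_xdistribute : Prop := ∀ (clusters : List String) (files : List String), Dom_xdistribute clusters files → Spec_xdistribute clusters files (xdistribute clusters files)

-- ===== LEMMAS AND PROOFS =====

-- the round-robin key clusters[i % len(clusters)] is a member of clusters
theorem pv_key_mem (clusters : List String) (hne : clusters ≠ []) (i : Int) :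
    PySem.List.pyGetD clusters (PySem.Int.mod i (clusters.length : Int)) "" ∈ clusters := by
  have hpos : (0 : Int) < (clusters.length : Int) := by
    have := List.length_pos_iff.mpr hne
    exact_mod_cast this
  refine PySem.List.pyGetD_mem _ _ ⟨?_, PySem.Int.mod_lt i hpos⟩
  have := PySem.Int.mod_nonneg i hpos
  omega

-- the zip-built initial dict has value [] at every key
theorem pv_getD_init (ps : List (String × List String)) (d : PySem.Dict String (List String))
    (c : String) (h : ∀ kv ∈ ps, kv.2 = ([] : List String)) (hd : d.getD c [] = []) :
    (ps.foldl (fun d kv => d.insert kv.1 kv.2) d).getD c [] = [] := by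
  induction ps generalizing d with
  | nil => simpa using hd
  | cons kv ps ih =>
    simp only [List.foldl_cons]
    refine ih _ (fun q hq => h q (List.mem_cons_of_mem _ hq)) ?_
    rw [PySem.Dict.getD_insert]
    split_ifs with hc
    · exact h kv (List.mem_cons_self)
    · exact hd

-- A's per-file modify loop, read per key
theorem pv_getD_A (files : List String) (key : Int → String)
    (init : PySem.Dict String (List String)) (c : String) :
    ((PySem.List.enumerate files).foldl
        (fun d p => d.modify (key p.1) [] (fun l => l ++ [p.2])) init).getD c []
      = init.getD c []
        ++ ((PySem.List.enumerate files).filter (fun p => key p.1 == c)).map (·.2) := by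
  have hfold :
      ((PySem.List.enumerate files).foldl
          (fun d p => d.modify (key p.1) [] (fun l => l ++ [p.2])) init)
        = (((PySem.List.enumerate files).map (fun p => (key p.1, p.2))).foldl
            (fun d q => d.modify q.1 [] (fun l => l ++ [q.2])) init) := by
    rw [List.foldl_map]
  rw [hfold, PySem.Dict.getD_foldl_modify_append, List.filter_map, List.map_map]
  rfl

-- B's per-cluster insert loop, read per key (value depends only on the key)
theorem pv_getD_B (cs : List String) (G : String → List String)
    (d : PySem.Dict String (List String)) (c : String) :
    (cs.foldl (fun d x => d.insert x (G x)) d).getD c []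
      = if c ∈ cs then G c else d.getD c [] := by
  induction cs generalizing d with
  | nil => simp
  | cons x cs ih =>
    simp only [List.foldl_cons, ih, PySem.Dict.getD_insert]
    by_cases hx : c ∈ cs
    · simp [hx]
    · by_cases hcx : c = x
      · simp [hcx]
      · simp [hx, hcx]

-- a Set.update by elements already present does nothing
theorem pv_update_of_subset (s : PySem.Set String) (xs : List String)
    (h : ∀ x ∈ xs, x ∈ s) : PySem.Set.update s xs = s := by
  rw [PySem.Set.update_eq_append_filter]
  have hnil : List.filter (fun y => !s.contains y) (PySem.Set.ofList xs) = [] := by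
    rw [List.filter_eq_nil_iff]
    intro y hy
    have hmem : y ∈ s := h y ((PySem.Set.mem_ofList xs y).mp hy)
    simpa using hmem
  rw [hnil, List.append_nil]

-- keys of the zip-built initial dict are exactly Set.ofList clusters
theorem pv_keys_init (clusters : List String) :
    ((clusters.zip ((PySem.List.pyRange 0 (clusters.length : Int) 1).map
        (fun _ => ([] : List String)))).foldl
      (fun d kv => d.insert kv.1 kv.2) PySem.Dict.empty).keys
      = PySem.Set.ofList clusters := by
  have hlen : clusters.length ≤
      ((PySem.List.pyRange 0 (clusters.length : Int) 1).map
        (fun _ => ([] : List String))).length := by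
    simp [PySem.List.length_pyRange_one]
  have := PySem.Dict.keys_foldl_insert_key
    (clusters.zip ((PySem.List.pyRange 0 (clusters.length : Int) 1).map
      (fun _ => ([] : List String)))) Prod.fst (fun _ kv => kv.2) PySem.Dict.empty
  rw [this, PySem.Dict.keys_empty, PySem.Set.update_nil_left, List.map_fst_zip hlen]

-- every index produced by enumerate is what it is; keys of A's final dict stay ofList clusters
theorem pv_keys_A (clusters files : List String) (hne : clusters ≠ []) :
    (((PySem.List.enumerate files).foldl
        (fun d p =>
          d.modify (PySem.List.pyGetD clusters (PySem.Int.mod p.1 (clusters.length : Int)) "") []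
            (fun l => l ++ [p.2]))
        ((clusters.zip ((PySem.List.pyRange 0 (clusters.length : Int) 1).map
            (fun _ => ([] : List String)))).foldl
          (fun d kv => d.insert kv.1 kv.2) PySem.Dict.empty)).keys)
      = PySem.Set.ofList clusters := by
  rw [PySem.Dict.keys_foldl_modify_key (PySem.List.enumerate files)
      (fun p => PySem.List.pyGetD clusters (PySem.Int.mod p.1 (clusters.length : Int)) "")
      [] (fun _ p l => l ++ [p.2]), pv_keys_init]
  refine pv_update_of_subset _ _ ?_
  intro x hx
  rcases List.mem_map.mp hx with ⟨p, _, rfl⟩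
  exact (PySem.Set.mem_ofList _ _).mpr (pv_key_mem clusters hne p.1)

theorem pv_keys_B (clusters files : List String) :
    ((clusters.foldl
        (fun d c =>
          d.insert c
            (((PySem.List.enumerate files).filter
                (fun p => PySem.List.pyGetD clusters (PySem.Int.mod p.1 (clusters.length : Int)) "" == c)).map
              (·.2)))
        PySem.Dict.empty).keys)
      = PySem.Set.ofList clusters := by
  rw [PySem.Dict.keys_foldl_insert clusters
      (fun _ c => ((PySem.List.enumerate files).filter
        (fun p => PySem.List.pyGetD clusters (PySem.Int.mod p.1 (clusters.length : Int)) "" == c)).map (·.2))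
      PySem.Dict.empty,
    PySem.Dict.keys_empty, PySem.Set.update_nil_left]

-- ===== VERDICT (by name: the statement is the Claim_ definition above) =====
theorem xdistribute_spec : Claim_equal_xdistribute := by
  intro clusters files _
  unfold Spec_xdistribute xdistribute xdistribute_alt
  by_cases hne : clusters = []
  · simp [hne]
  simp only [if_neg hne]
  set key : Int → String :=
    fun i => PySem.List.pyGetD clusters (PySem.Int.mod i (clusters.length : Int)) "" with hkey
  set G : String → List String :=
    fun c => ((PySem.List.enumerate files).filter (fun p => key p.1 == c)).map (·.2) with hG
  set init : PySem.Dict String (List String) :=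
    (clusters.zip ((PySem.List.pyRange 0 (clusters.length : Int) 1).map
      (fun _ => ([] : List String)))).foldl
      (fun d kv => d.insert kv.1 kv.2) PySem.Dict.empty with hinit
  set dA : PySem.Dict String (List String) :=
    (PySem.List.enumerate files).foldl
      (fun d p => d.modify (key p.1) [] (fun l => l ++ [p.2])) init with hdA
  set dB : PySem.Dict String (List String) :=
    clusters.foldl (fun d c => d.insert c (G c)) PySem.Dict.empty with hdB
  have hkA : dA.keys = PySem.Set.ofList clusters := pv_keys_A clusters files hne
  have hkB : dB.keys = PySem.Set.ofList clusters := pv_keys_B clusters files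
  have hndA : dA.keys.Nodup := by rw [hkA]; exact PySem.Set.nodup_ofList clusters
  have hndB : dB.keys.Nodup := by rw [hkB]; exact PySem.Set.nodup_ofList clusters
  have hitems : dA.items = dB.items := by
    rw [PySem.Dict.items_eq_map_keys dA hndA [], PySem.Dict.items_eq_map_keys dB hndB [],
      hkA, hkB]
    refine List.map_congr_left ?_
    intro k hk
    have hkmem : k ∈ clusters := (PySem.Set.mem_ofList _ _).mp hk
    have hA : dA.getD k [] = G k := by
      rw [hdA, pv_getD_A files key init k]
      have hinit0 : init.getD k [] = [] := by
        rw [hinit]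
        refine pv_getD_init _ _ _ ?_ (PySem.Dict.getD_empty _ _)
        intro kv hkv
        obtain ⟨k1, v1⟩ := kv
        rcases List.mem_map.mp (List.of_mem_zip hkv).2 with ⟨_, _, h3⟩
        exact h3.symm
      rw [hinit0, List.nil_append, hG]
    have hB : dB.getD k [] = G k := by
      rw [hdB, pv_getD_B clusters G PySem.Dict.empty k, if_pos hkmem]
    rw [hA, hB]
  rw [hitems]
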